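-- pv_equiv track=rewrite | github.com/devjohnnydev/-SIMDCCONR01 | reports/engine_text.py | _nr17_achado
-- ===== SOURCE A (Python) =====
-- def _nr17_achado(items):
--     """Gera achado NR-17 baseado nos itens."""
--     criticos = [i for i in items if i['classificacao_key'] == 'critico']
--     if criticos:
--         return 'Sobrecarga cognitiva e/ou inadequação organizacional identificada.'
--     atencao = [i for i in items if i['classificacao_key'] == 'atencao']
--     if atencao:
--         return 'Sinais de sobrecarga ergonômica que demandam atenção.'
--     return 'Condições ergonômicas dentro dos parâmetros adequados.'
-- ===== SOURCE B (Python) =====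
-- def _nr17_achado(items):
--     """Gera achado NR-17 baseado nos itens."""
--     rank = 0
--     for i in items:
--         k = i['classificacao_key']
--         r = 2 if k == 'critico' else (1 if k == 'atencao' else 0)
--         if r > rank:
--             rank = r
--     return ('Condições ergonômicas dentro dos parâmetros adequados.',
--             'Sinais de sobrecarga ergonômica que demandam atenção.',
--             'Sobrecarga cognitiva e/ou inadequação organizacional identificada.')[rank]
-- ===== Notes on version B (the rewrite author's own statement) =====
-- stated objective: alternative
-- what changed: B replaces A's two filtered scans and if-chain by a single pass that folds each item's severity into a numeric max-rank accumulator and then indexes a message table by that rank.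
import Mathlib
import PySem

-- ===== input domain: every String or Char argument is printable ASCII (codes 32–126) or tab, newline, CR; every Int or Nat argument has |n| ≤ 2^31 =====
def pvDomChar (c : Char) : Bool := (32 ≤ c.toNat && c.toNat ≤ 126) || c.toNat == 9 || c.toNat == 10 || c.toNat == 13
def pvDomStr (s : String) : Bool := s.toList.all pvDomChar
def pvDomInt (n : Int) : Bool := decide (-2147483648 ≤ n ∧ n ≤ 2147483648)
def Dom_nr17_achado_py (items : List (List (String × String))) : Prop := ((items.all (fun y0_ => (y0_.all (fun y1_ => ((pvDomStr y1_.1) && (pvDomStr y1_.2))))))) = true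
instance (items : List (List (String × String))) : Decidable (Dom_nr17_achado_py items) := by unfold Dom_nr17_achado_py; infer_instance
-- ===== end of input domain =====

-- B replaces A's two filtered scans and if-chain by a single max-rank fold plus a table lookup (alternative; same cost).

-- ===== PORT A =====
-- criticos = [i for i in items if i['classificacao_key'] == 'critico'] ; then the same for 'atencao'
def nr17_achado_py (items : List (List (String × String))) : String :=
  let criticos := items.filter (fun i => (PySem.Dict.mk i).get? "classificacao_key" == some "critico")
  if !criticos.isEmpty then "Sobrecarga cognitiva e/ou inadequação organizacional identificada."
  else
    let atencao := items.filter (fun i => (PySem.Dict.mk i).get? "classificacao_key" == some "atencao")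
    if !atencao.isEmpty then "Sinais de sobrecarga ergonômica que demandam atenção."
    else "Condições ergonômicas dentro dos parâmetros adequados."

-- ===== PORT B =====
-- r = 2 if k == 'critico' else (1 if k == 'atencao' else 0)
def pvRankB (i : List (String × String)) : Nat :=
  if (PySem.Dict.mk i).get? "classificacao_key" == some "critico" then 2
  else if (PySem.Dict.mk i).get? "classificacao_key" == some "atencao" then 1 else 0

-- single pass: rank = max of item ranks; then tuple indexing by rank
def nr17_achado_py_alt (items : List (List (String × String))) : String :=
  let rank := items.foldl (fun acc i => if pvRankB i > acc then pvRankB i else acc) 0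
  ["Condições ergonômicas dentro dos parâmetros adequados.",
   "Sinais de sobrecarga ergonômica que demandam atenção.",
   "Sobrecarga cognitiva e/ou inadequação organizacional identificada."].getD rank ""

-- ===== PRECONDITION & SPEC =====
-- Pre_ excludes items lacking the 'classificacao_key' key, on which both A and B raise KeyError.
def Pre_nr17_achado_py (items : List (List (String × String))) : Prop :=
  ∀ i ∈ items, ((PySem.Dict.mk i).get? "classificacao_key").isSome = true
instance (items : List (List (String × String))) : Decidable (Pre_nr17_achado_py items) := by unfold Pre_nr17_achado_py; infer_instance
def pvWitness_nr17_achado_py : (List (List (String × String))) := [[("classificacao_key", "critico")], [("classificacao_key", "ok")]]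

def Spec_nr17_achado_py (items : List (List (String × String))) (out : String) : Prop := out = nr17_achado_py_alt items
instance (items : List (List (String × String))) (out : String) : Decidable (Spec_nr17_achado_py items out) := by unfold Spec_nr17_achado_py; infer_instance

-- ===== CLAIM (what is proved, stated in full; the proofs are below) =====
def Claim_equal_nr17_achado_py : Prop := ∀ (items : List (List (String × String))), Dom_nr17_achado_py items → Pre_nr17_achado_py items → Spec_nr17_achado_py items (nr17_achado_py items)

-- ===== LEMMAS AND PROOFS =====

-- B's fold step is max
lemma stepB_eq_max (a : Nat) (i : List (String × String)) :
    (if pvRankB i > a then pvRankB i else a) = max a (pvRankB i) := by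
  split <;> omega

lemma foldB_eq_max (l : List (List (String × String))) (a : Nat) :
    l.foldl (fun acc i => if pvRankB i > acc then pvRankB i else acc) a
      = max a (l.foldl (fun acc i => if pvRankB i > acc then pvRankB i else acc) 0) := by
  induction l generalizing a with
  | nil => simp
  | cons j t ih =>
    simp only [List.foldl_cons]
    rw [ih, ih (if pvRankB j > 0 then pvRankB j else 0)]
    have := stepB_eq_max a j
    have := stepB_eq_max 0 j
    omega

-- upper bound of the fold
lemma foldB_le (l : List (List (String × String))) (a b : Nat) (ha : a ≤ b)
    (h : ∀ i ∈ l, pvRankB i ≤ b) :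
    l.foldl (fun acc i => if pvRankB i > acc then pvRankB i else acc) a ≤ b := by
  induction l generalizing a with
  | nil => simpa
  | cons j t ih =>
    simp only [List.foldl_cons]
    apply ih
    · have hj := h j (by simp)
      split <;> omega
    · intro i hi; exact h i (by simp [hi])

-- each member's rank bounds the fold from below
lemma le_foldB (l : List (List (String × String))) (a : Nat) (i : List (String × String))
    (hi : i ∈ l) :
    pvRankB i ≤ l.foldl (fun acc i => if pvRankB i > acc then pvRankB i else acc) a := by
  induction l generalizing a with
  | nil => cases hi
  | cons j t ih =>
    simp only [List.foldl_cons]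
    rcases List.mem_cons.mp hi with h | h
    · subst h
      rw [foldB_eq_max]
      have := stepB_eq_max a i
      omega
    · exact ih _ h

lemma rankB_le_two (i : List (String × String)) : pvRankB i ≤ 2 := by
  unfold pvRankB; split <;> [omega; split <;> omega]

-- filter nonempty ↔ some member has that key value
lemma filter_key_iff (items : List (List (String × String))) (v : String) :
    (¬ (items.filter (fun i => (PySem.Dict.mk i).get? "classificacao_key" == some v)).isEmpty)
      ↔ ∃ i ∈ items, (PySem.Dict.mk i).get? "classificacao_key" = some v := by
  simp [List.isEmpty_iff, List.filter_eq_nil_iff]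

-- ===== VERDICT (by name: the statement is the Claim_ definition above) =====
theorem nr17_achado_py_spec : Claim_equal_nr17_achado_py := by
  intro items _ _
  unfold Spec_nr17_achado_py nr17_achado_py nr17_achado_py_alt
  set M := items.foldl (fun acc i => if pvRankB i > acc then pvRankB i else acc) 0 with hM
  by_cases hc : ∃ i ∈ items, (PySem.Dict.mk i).get? "classificacao_key" = some "critico"
  · obtain ⟨i, hi, hk⟩ := hc
    have h2 : pvRankB i = 2 := by unfold pvRankB; simp [hk]
    have hle : M ≤ 2 := foldB_le items 0 2 (by omega) (fun i _ => rankB_le_two i)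
    have hge : 2 ≤ M := by
      have h := le_foldB items 0 i hi
      rw [← hM] at h; omega
    have hM2 : M = 2 := by omega
    have hcne := (filter_key_iff items "critico").mpr ⟨i, hi, hk⟩
    rw [if_pos (by simpa using hcne), hM2]
    rfl
  · have hne2 : ∀ i ∈ items, pvRankB i ≤ 1 := by
      intro i hi
      unfold pvRankB
      split
      · exact absurd ⟨i, hi, by simp_all⟩ hc
      · split <;> omega
    have hcEmpty : (items.filter (fun i => (PySem.Dict.mk i).get? "classificacao_key" == some "critico")).isEmpty := by
      by_contra h
      exact hc ((filter_key_iff items "critico").mp h)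
    rw [if_neg (by simp [hcEmpty])]
    by_cases ha : ∃ i ∈ items, (PySem.Dict.mk i).get? "classificacao_key" = some "atencao"
    · obtain ⟨i, hi, hk⟩ := ha
      have h1 : pvRankB i = 1 := by
        unfold pvRankB
        rw [if_neg (by simp [hk]), if_pos (by simp [hk])]
      have hle : M ≤ 1 := foldB_le items 0 1 (by omega) hne2
      have hge : 1 ≤ M := by
        have h := le_foldB items 0 i hi
        rw [← hM] at h; omega
      have hM1 : M = 1 := by omega
      rw [if_pos (by simpa using (filter_key_iff items "atencao").mpr ⟨i, hi, hk⟩), hM1]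
      rfl
    · have hne1 : ∀ i ∈ items, pvRankB i = 0 := by
        intro i hi
        unfold pvRankB
        rw [if_neg (by simp only [beq_iff_eq]; exact fun h => hc ⟨i, hi, h⟩),
            if_neg (by simp only [beq_iff_eq]; exact fun h => ha ⟨i, hi, h⟩)]
      have hle : M ≤ 0 := foldB_le items 0 0 (by omega) (fun i hi => (hne1 i hi).le)
      have hM0 : M = 0 := by omega
      have haEmpty : (items.filter (fun i => (PySem.Dict.mk i).get? "classificacao_key" == some "atencao")).isEmpty := by
        by_contra h
        exact ha ((filter_key_iff items "atencao").mp h)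
      rw [if_neg (by simp [haEmpty]), hM0]
      rfl
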